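-- pv_equiv track=rewrite | github.com/bobflagg/entity-linking | disambiguation/src/kpe/candidate_extractor.py | contract_pos
-- ===== SOURCE A (Python) =====
-- def contract_pos(tagged_sentence):
--     '''
--     Returns a version of the given POS tagged sentence with split
--     possessives combined.
--         @param tagged_sentence: The POS tagged sentence.
--     '''
--     ts = []
--     for token, tag in tagged_sentence:
--         if token == "'s":
--             try:
--                 prev_token, prev_tag = ts.pop(-1)
--                 prev_token += "'s"
--                 ts.append((prev_token, prev_tag))
--             except: ts.append((token, tag))
--         else: ts.append((token, tag))
--     return ts
-- ===== SOURCE B (Python) =====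
-- def contract_pos(tagged_sentence):
--     toks = list(tagged_sentence)
--     n = len(toks)
--     out = []
--     i = 0
--     while i < n:
--         token, tag = toks[i]
--         j = i + 1
--         while j < n and toks[j][0] == "'s":
--             token += "'s"
--             j += 1
--         out.append((token, tag))
--         i = j
--     return out
-- ===== Notes on version B (the rewrite author's own statement) =====
-- stated objective: alternative
-- what changed: B groups forward: each token is taken as a head and an inner scan consumes the following run of "'s" tokens into it, instead of A's backward pop-and-reappend on the output list.
import Mathlib
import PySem

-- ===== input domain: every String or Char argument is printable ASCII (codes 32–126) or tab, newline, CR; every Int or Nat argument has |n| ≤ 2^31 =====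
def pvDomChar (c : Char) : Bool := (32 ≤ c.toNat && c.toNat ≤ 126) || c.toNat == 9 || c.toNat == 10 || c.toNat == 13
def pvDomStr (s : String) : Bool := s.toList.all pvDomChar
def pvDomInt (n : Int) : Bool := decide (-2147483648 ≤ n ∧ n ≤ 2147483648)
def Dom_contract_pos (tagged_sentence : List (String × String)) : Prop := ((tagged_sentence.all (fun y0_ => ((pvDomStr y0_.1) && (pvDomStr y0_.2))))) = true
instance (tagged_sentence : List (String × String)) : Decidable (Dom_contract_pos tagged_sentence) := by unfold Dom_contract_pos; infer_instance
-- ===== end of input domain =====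

-- B regroups forward (each head token consumes the following run of "'s" tokens) instead of A's backward pop-and-reappend; same result, same cost (objective: alternative).


-- ===== PORT A =====
-- Port of A: fold over the sentence; on "'s", pop the last output pair and re-append it merged
-- (empty-list pop = the except branch, which appends the token as-is).
def contract_pos (tagged_sentence : List (String × String)) : List (String × String) :=
  tagged_sentence.foldl
    (fun ts p =>
      if p.1 = "'s" then
        match ts.getLast? with
        | none => ts ++ [p]                                   -- pop raised: except branch
        | some prev => ts.dropLast ++ [(prev.1 ++ "'s", prev.2)]
      else ts ++ [p])
    []

-- ===== PORT B =====
-- Port of B: forward grouping; eatS is B's inner while loop consuming a run of "'s" tokens.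
def eatS (t : String) : List (String × String) → String × List (String × String)
  | [] => (t, [])
  | (tk, tg) :: rest => if tk = "'s" then eatS (t ++ "'s") rest else (t, (tk, tg) :: rest)

theorem eatS_len (t : String) (xs : List (String × String)) : (eatS t xs).2.length ≤ xs.length := by
  induction xs generalizing t with
  | nil => simp [eatS]
  | cons x rest ih =>
    obtain ⟨tk, tg⟩ := x
    by_cases h : tk = "'s"
    · simp only [eatS, if_pos h]
      exact le_trans (ih _) (Nat.le_succ _)
    · simp [eatS, h]

def contract_pos_alt : List (String × String) → List (String × String)
  | [] => []
  | (t, tg) :: rest =>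
    let r := eatS t rest
    (r.1, tg) :: contract_pos_alt r.2
termination_by xs => xs.length
decreasing_by
  simp only [List.length_cons]
  exact Nat.lt_succ_of_le (eatS_len _ _)

-- ===== PRECONDITION & SPEC =====
def Spec_contract_pos (tagged_sentence : List (String × String)) (out : List (String × String)) : Prop := out = contract_pos_alt tagged_sentence
instance (tagged_sentence : List (String × String)) (out : List (String × String)) : Decidable (Spec_contract_pos tagged_sentence out) := by unfold Spec_contract_pos; infer_instance

-- ===== CLAIM (what is proved, stated in full; the proofs are below) =====
def Claim_equal_contract_pos : Prop := ∀ (tagged_sentence : List (String × String)), Dom_contract_pos tagged_sentence → Spec_contract_pos tagged_sentence (contract_pos tagged_sentence)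

-- ===== LEMMAS AND PROOFS =====

-- ===== VERDICT (by name: the statement is the Claim_ definition above) =====
-- Loop invariant: running A's fold from an accumulator ending in (t, tg) gives the untouched
-- prefix acc followed by B's forward grouping started with head (t, tg).
theorem foldl_stepA (xs : List (String × String)) :
    ∀ (acc : List (String × String)) (t tg : String),
    List.foldl
      (fun ts p =>
        if p.1 = "'s" then
          match ts.getLast? with
          | none => ts ++ [p]
          | some prev => ts.dropLast ++ [(prev.1 ++ "'s", prev.2)]
        else ts ++ [p])
      (acc ++ [(t, tg)]) xs
    = acc ++ ((eatS t xs).1, tg) :: contract_pos_alt (eatS t xs).2 := by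
  induction xs with
  | nil => intro acc t tg; simp [eatS, contract_pos_alt]
  | cons x rest ih =>
    intro acc t tg
    obtain ⟨tk, tg2⟩ := x
    by_cases h : tk = "'s"
    · subst h
      simp only [List.foldl_cons, List.getLast?_append, List.getLast?_singleton,
        List.dropLast_concat, eatS]
      exact ih acc (t ++ "'s") tg
    · simp only [List.foldl_cons, if_neg h]
      rw [show (acc ++ [(t, tg)]) ++ [(tk, tg2)] = (acc ++ [(t, tg)]) ++ [(tk, tg2)] from rfl,
        ih (acc ++ [(t, tg)]) tk tg2]
      simp [eatS, h, contract_pos_alt, List.append_assoc]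

theorem contract_pos_spec : Claim_equal_contract_pos := by
  intro xs _
  unfold Spec_contract_pos contract_pos
  cases xs with
  | nil => simp [contract_pos_alt]
  | cons x rest =>
    obtain ⟨t, tg⟩ := x
    have key := foldl_stepA rest [] t tg
    simp only [List.nil_append] at key
    by_cases h : t = "'s"
    · subst h
      simpa [contract_pos_alt, List.foldl_cons] using key
    · simpa [contract_pos_alt, List.foldl_cons, h, eatS] using key
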